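-- pv_equiv track=rewrite | github.com/MaryFknChristmas/PythonSeminar4 | task5.py | get_ones
-- ===== SOURCE A (Python) =====
-- def get_ones(line):
--     tmp = []
--     last = 0
--     positive = True
--     for i, item in enumerate(line):
--         if item in {'+', '-'}:
--             if positive:
--                 tmp.append(line[last:i])
--             else:
--                 tmp.append('-' + line[last:i])
--             last = i + 1
--             positive = item == '+'
--
--     if positive:
--         tmp.append(line[last:])
--     else:
--         tmp.append('-' + line[last:])
--     return tmp
-- ===== SOURCE B (Python) =====
-- def get_ones(line):
--     # Each '-' starts a new token carrying a '-' prefix; each '+' starts a bare token.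
--     # Rewriting every '-' as the separator '+' followed by a literal '-' makes a single
--     # split('+') produce exactly those tokens (no sentinel: both chars are the delimiters themselves).
--     return line.replace('-', '+-').split('+')
-- ===== Notes on version B (the rewrite author's own statement) =====
-- stated objective: faster
-- what changed: Replaced A's manual enumerate/index state-machine scan (tracking last split position and pending sign) by a single rewrite-and-split: line.replace('-', '+-').split('+'), which yields exactly the same tokens including all empty ones.
import Mathlib
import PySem

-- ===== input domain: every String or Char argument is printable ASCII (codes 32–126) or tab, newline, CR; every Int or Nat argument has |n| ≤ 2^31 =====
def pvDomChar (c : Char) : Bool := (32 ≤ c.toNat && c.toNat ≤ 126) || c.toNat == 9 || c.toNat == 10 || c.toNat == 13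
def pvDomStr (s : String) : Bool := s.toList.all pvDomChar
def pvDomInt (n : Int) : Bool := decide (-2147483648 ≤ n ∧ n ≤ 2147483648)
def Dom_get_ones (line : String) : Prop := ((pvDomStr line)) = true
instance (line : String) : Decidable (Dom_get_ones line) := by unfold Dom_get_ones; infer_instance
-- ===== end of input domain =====

-- B replaces A's manual index/state-machine scan by one rewrite+split (replace then split), measured faster by a constant factor; same return value.


-- ===== PORT A =====
-- strings are handled as their code-point lists (PySem.Chars convention); tokens are built
-- as List Char and packed into String at the very end — exact for Python str.
-- loop body of A's 'for i, item in enumerate(line)'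
def get_ones_step (cs : List Char) (st : List (List Char) × Int × Bool) (p : Int × Char) :
    List (List Char) × Int × Bool :=
  if p.2 == '+' || p.2 == '-' then
    ((if st.2.2 then st.1 ++ [PySem.List.slice cs (some st.2.1) (some p.1)]
      else st.1 ++ ['-' :: PySem.List.slice cs (some st.2.1) (some p.1)]),
     p.1 + 1, p.2 == '+')
  else st

-- A's trailing append after the loop
def get_ones_fin (cs : List Char) (st : List (List Char) × Int × Bool) : List (List Char) :=
  if st.2.2 then st.1 ++ [PySem.List.slice cs (some st.2.1) none]
  else st.1 ++ ['-' :: PySem.List.slice cs (some st.2.1) none]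

def get_ones (line : String) : List String :=
  (get_ones_fin line.toList
    ((PySem.List.enumerate line.toList 0).foldl (get_ones_step line.toList) ([], 0, true))).map
    String.ofList

-- ===== PORT B =====
def get_ones_alt (line : String) : List String :=
  (PySem.Str.split? (PySem.Str.replace line "-" "+-") "+").getD []

-- ===== PRECONDITION & SPEC =====
def Spec_get_ones (line : String) (out : List String) : Prop := out = get_ones_alt line
instance (line : String) (out : List String) : Decidable (Spec_get_ones line out) := by unfold Spec_get_ones; infer_instance

-- ===== CLAIM (what is proved, stated in full; the proofs are below) =====
def Claim_equal_get_ones : Prop := ∀ (line : String), Dom_get_ones line → Spec_get_ones line (get_ones line)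

-- ===== LEMMAS AND PROOFS =====

-- the per-char image under replace('-', '+-')
def pvF (c : Char) : List Char := if c = '-' then ['+', '-'] else [c]

-- clean recursion computing split('+') on a char list
def pvSp : List Char → List (List Char)
  | [] => [[]]
  | c :: t =>
    if c = '+' then [] :: pvSp t
    else match pvSp t with
      | [] => [[c]]
      | h :: r => (c :: h) :: r

-- prepend a pending prefix to the first piece
def pvPre (pre : List Char) : List (List Char) → List (List Char)
  | [] => [pre]
  | h :: r => (pre ++ h) :: r

-- common spec: (first token (unsigned), remaining sign-applied tokens)
def pvG : List Char → List Char × List (List Char)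
  | [] => ([], [])
  | c :: t =>
    let p := pvG t
    if c = '+' then ([], p.1 :: p.2)
    else if c = '-' then ([], ('-' :: p.1) :: p.2)
    else (c :: p.1, p.2)

def pvSgn (pos : Bool) (tok : List Char) : List Char := if pos then tok else '-' :: tok

theorem pvSp_ne_nil (l : List Char) : pvSp l ≠ [] := by
  cases l with
  | nil => simp [pvSp]
  | cons c t =>
    simp only [pvSp]
    split
    · simp
    · split <;> simp

theorem rep_go (fuel : Nat) : ∀ (l acc : List Char), l.length ≤ fuel →
    PySem.Chars.replace.go ['-'] ['+', '-'] fuel l acc = acc.reverse ++ l.flatMap pvF := by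
  induction fuel with
  | zero =>
    intro l acc h
    have : l = [] := List.eq_nil_of_length_eq_zero (Nat.le_zero.mp h)
    subst this
    simp [PySem.Chars.replace.go]
  | succ n ih =>
    intro l acc h
    cases l with
    | nil => simp [PySem.Chars.replace.go]
    | cons c t =>
      simp only [PySem.Chars.replace.go, List.isPrefixOf, List.flatMap_cons]
      by_cases hc : c = '-'
      · subst hc
        simp only [beq_self_eq_true, Bool.true_and, List.isPrefixOf_nil_left, if_true]
        rw [ih _ _ (by simpa using Nat.le_of_succ_le_succ h)]
        simp [pvF]
      · have hbc : ('-' == c) = false := by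
          simp; intro hh; exact hc hh.symm
        simp only [hbc, Bool.false_and, Bool.false_eq_true, if_false]
        rw [ih _ _ (by simpa using Nat.le_of_succ_le_succ h)]
        simp [pvF, hc]

theorem rep_eq (cs : List Char) :
    PySem.Chars.replace cs ['-'] ['+', '-'] = cs.flatMap pvF := by
  simp only [PySem.Chars.replace]
  rw [if_neg (by simp)]
  rw [rep_go cs.length cs [] (le_refl _)]
  simp

theorem split_go (fuel : Nat) : ∀ (l cur : List Char) (acc : List (List Char)),
    l.length ≤ fuel →
    PySem.Chars.splitOn.go ['+'] fuel l cur acc = acc.reverse ++ pvPre cur.reverse (pvSp l) := by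
  induction fuel with
  | zero =>
    intro l cur acc h
    have : l = [] := List.eq_nil_of_length_eq_zero (Nat.le_zero.mp h)
    subst this
    simp [PySem.Chars.splitOn.go, pvSp, pvPre]
  | succ n ih =>
    intro l cur acc h
    cases l with
    | nil => simp [PySem.Chars.splitOn.go, pvSp, pvPre]
    | cons c t =>
      simp only [PySem.Chars.splitOn.go, List.isPrefixOf]
      by_cases hc : c = '+'
      · subst hc
        simp only [beq_self_eq_true, Bool.true_and, List.isPrefixOf_nil_left, if_true]
        rw [ih _ _ _ (by simpa using Nat.le_of_succ_le_succ h)]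
        cases hs : pvSp t with
        | nil => exact absurd hs (pvSp_ne_nil t)
        | cons h0 r => simp [pvSp, pvPre, hs]
      · have hbc : ('+' == c) = false := by
          simp; intro hh; exact hc hh.symm
        simp only [hbc, Bool.false_and, Bool.false_eq_true, if_false]
        rw [ih _ _ _ (by simpa using Nat.le_of_succ_le_succ h)]
        have hne := pvSp_ne_nil t
        cases hs : pvSp t with
        | nil => exact absurd hs hne
        | cons h0 r =>
          simp [pvSp, pvPre, hc, hs]

theorem splitOn_eq (l : List Char) : PySem.Chars.splitOn l ['+'] = pvSp l := by
  simp only [PySem.Chars.splitOn]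
  rw [split_go (l.length + 1) l [] [] (by omega)]
  have hne := pvSp_ne_nil l
  cases hs : pvSp l with
  | nil => exact absurd hs hne
  | cons h0 r => simp [pvPre]

theorem pvSp_flatMap (l : List Char) : pvSp (l.flatMap pvF) = (pvG l).1 :: (pvG l).2 := by
  induction l with
  | nil => simp [pvSp, pvG]
  | cons c t ih =>
    by_cases hp : c = '+'
    · subst hp
      simp [pvF, pvSp, pvG, ih]
    · by_cases hm : c = '-'
      · subst hm
        simp only [List.flatMap_cons, pvF, if_pos rfl]
        show pvSp ('+' :: '-' :: t.flatMap pvF) = _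
        rw [show pvSp ('+' :: '-' :: t.flatMap pvF) = [] :: pvSp ('-' :: t.flatMap pvF) from by simp [pvSp]]
        rw [show pvSp ('-' :: t.flatMap pvF) = match pvSp (t.flatMap pvF) with
              | [] => [['-']] | h :: r => ('-' :: h) :: r from by simp [pvSp]]
        rw [ih]
        simp [pvG]
      · simp only [List.flatMap_cons, pvF, if_neg hm, List.singleton_append]
        rw [show pvSp (c :: t.flatMap pvF) = match pvSp (t.flatMap pvF) with
              | [] => [[c]] | h :: r => (c :: h) :: r from by simp [pvSp, hp]]
        rw [ih]
        simp [pvG, hp, hm]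

theorem B_chars (line : String) :
    get_ones_alt line = ((pvG line.toList).1 :: (pvG line.toList).2).map String.ofList := by
  simp only [get_ones_alt, PySem.Str.split?, PySem.Chars.split?]
  rw [if_neg (by simp [PySem.Str.toList_replace])]
  simp only [Option.map_some, Option.getD_some]
  rw [PySem.Str.toList_replace]
  have h1 : ("-" : String).toList = ['-'] := rfl
  have h2 : ("+-" : String).toList = ['+', '-'] := rfl
  have h3 : ("+" : String).toList = ['+'] := rfl
  rw [h1, h2, h3, rep_eq, splitOn_eq, pvSp_flatMap]

theorem A_run (cs : List Char) : ∀ (t : List Char) (l k : Nat)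
    (tmp : List (List Char)) (pos : Bool), l ≤ k → cs.drop k = t →
    get_ones_fin cs ((PySem.List.enumerate t (k : Int)).foldl (get_ones_step cs) (tmp, (l : Int), pos)) =
      tmp ++ (pvSgn pos ((cs.drop l).take (k - l) ++ (pvG t).1) :: (pvG t).2) := by
  intro t
  induction t with
  | nil =>
    intro l k tmp pos hlk hdrop
    have hk : cs.length ≤ k := by
      by_contra hlt
      push_neg at hlt
      have := List.drop_eq_nil_iff.mp hdrop
      omega
    have htake : (cs.drop l).take (k - l) = cs.drop l := by
      apply List.take_of_length_le
      simp
      omega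
    simp only [PySem.List.enumerate_nil, List.foldl_nil, get_ones_fin, pvG, htake,
      List.append_nil]
    have hslice : PySem.List.slice cs (some (l : Int)) none = cs.drop l :=
      PySem.List.slice_from_natCast cs l
    cases pos <;> simp [pvSgn, hslice]
  | cons c t ih =>
    intro l k tmp pos hlk hdrop
    have hk : k < cs.length := by
      by_contra hge
      push_neg at hge
      rw [List.drop_eq_nil_of_le hge] at hdrop
      exact (List.cons_ne_nil c t) hdrop.symm
    have hdrop' : cs.drop (k + 1) = t := by
      rw [← List.drop_drop, hdrop, List.drop_one, List.tail_cons]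
    rw [PySem.List.enumerate_cons]
    simp only [List.foldl_cons]
    by_cases hsgn : c = '+' ∨ c = '-'
    · have hstep : get_ones_step cs (tmp, (l : Int), pos) ((k : Int), c) =
          (tmp ++ [pvSgn pos ((cs.drop l).take (k - l))], ((k + 1 : Nat) : Int), (c == '+')) := by
        simp only [get_ones_step]
        rw [if_pos (by rcases hsgn with h | h <;> simp [h])]
        have hslice : PySem.List.slice cs (some (l : Int)) (some (k : Int)) =
            (cs.drop l).take (k - l) := PySem.List.slice_natCast cs l k
        cases pos <;> simp [pvSgn, hslice]
      rw [show ((k : Int) + 1) = (((k + 1 : Nat)) : Int) by push_cast; ring]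
      rw [hstep, ih (k + 1) (k + 1) _ _ (le_refl _) hdrop']
      simp only [Nat.sub_self, List.take_zero, List.nil_append, List.append_assoc,
        List.singleton_append]
      rcases hsgn with h | h <;> subst h
      · simp [pvG, pvSgn]
      · have : ¬ ('-' : Char) = '+' := by decide
        simp [pvG, pvSgn, this]
    · push_neg at hsgn
      have hstep : get_ones_step cs (tmp, (l : Int), pos) ((k : Int), c) = (tmp, (l : Int), pos) := by
        simp only [get_ones_step]
        rw [if_neg (by simp [hsgn.1, hsgn.2])]
      rw [show ((k : Int) + 1) = (((k + 1 : Nat)) : Int) by push_cast; ring]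
      rw [hstep, ih l (k + 1) _ _ (by omega) hdrop']
      have hc : cs[k] = c := by
        have : cs[k]? = some c := by
          rw [List.getElem?_eq_getElem hk]
          have := congrArg (fun x => x.head?) hdrop
          simpa [List.head?_drop, List.getElem?_eq_getElem hk] using this
        simpa [List.getElem?_eq_getElem hk] using this
      have htake : (cs.drop l).take (k + 1 - l) = (cs.drop l).take (k - l) ++ [c] := by
        have hlen : k - l < (cs.drop l).length := by simp; omega
        rw [show k + 1 - l = (k - l) + 1 by omega, List.take_succ,
          List.getElem?_eq_getElem hlen]
        simp [List.getElem_drop, show l + (k - l) = k by omega, hc]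
      rw [htake]
      simp [pvG, hsgn.1, hsgn.2, List.append_assoc]

-- ===== VERDICT (by name: the statement is the Claim_ definition above) =====
theorem get_ones_spec : Claim_equal_get_ones := by
  intro line _
  unfold Spec_get_ones
  rw [B_chars]
  simp only [get_ones]
  rw [show ((0 : Int) = ((0 : Nat) : Int)) from rfl,
    A_run line.toList line.toList 0 0 [] true (le_refl _) (by simp)]
  simp [pvSgn]
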